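-- pv_equiv track=rewrite | github.com/CompG05/ai-pa2-search | tests/test_logic_nqueens.py | n_queens_formula
-- ===== SOURCE A (Python) =====
-- def deny_all_conflicts(dimension, x, y):
--     """Return a conjunction of all conflicting cells, negated"""
--     conflicts = []
--
--     # for i in range(dimension):
--     #     if i != y:
--     #         conflicts.append(f"~Q{x}{i}")
--     #     if i != x:
--     #         conflicts.append(f"~Q{i}{y}")
--
--     # Rows
--     for j in range(y+1, dimension):
--         conflicts.append(f"~Q{x}{j}")
--
--     # Columns
--     for i in range(x + 1, dimension):
--         conflicts.append(f"~Q{i}{y}")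
--
--     for i in range(x+1, dimension):
--         for j in range(dimension):
--             if abs(i - x) == abs(j - y):
--                 conflicts.append(f"~Q{i}{j}")
--
--     conflicts_str = " & ".join(conflicts)
--     return f"({conflicts_str})"
--
-- def n_queens_formula(dimension):
--     str_row = ""
--     str_col = ""
--     conflicts_str = ""
--
--     for i in range(dimension):
--         str_row += "("
--         str_col += "("
--         for j in range(dimension - 1):
--             str_row += f"Q{i}{j} | "
--             str_col += f"Q{j}{i} | "
--
--         str_row += f"Q{i}{dimension-1}) & "
--         str_col += f"Q{dimension-1}{i}) & "
--
--     for i in range(dimension):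
--         for j in range(dimension):
--             consecuente = deny_all_conflicts(dimension, i, j)
--             if len(consecuente) > 2:
--                 conflicts_str += f"(Q{i}{j} ==> {consecuente}) & "
--     conflicts_str = conflicts_str[:-3]
--
--     return str_row + str_col + conflicts_str
-- ===== SOURCE B (Python) =====
-- def conflict_cells(n, x, y):
--     """Diagonal conflicts below row x: at most two cells per row, computed directly."""
--     cells = []
--     for i in range(x + 1, n):
--         d = i - x
--         for jj in (y - d, y + d):
--             if 0 <= jj < n:
--                 cells.append(f"~Q{i}{jj}")
--     return cells
--
-- def n_queens_formula(dimension):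
--     n = dimension
--     rows = "".join("(" + " | ".join(f"Q{i}{j}" for j in range(n)) + ") & " for i in range(n))
--     cols = "".join("(" + " | ".join(f"Q{j}{i}" for j in range(n)) + ") & " for i in range(n))
--     impls = []
--     for i in range(n):
--         for j in range(n):
--             after_row = [f"~Q{i}{k}" for k in range(j + 1, n)]
--             below_col = [f"~Q{k}{j}" for k in range(i + 1, n)]
--             cons = after_row + below_col + conflict_cells(n, i, j)
--             if cons:
--                 impls.append(f"(Q{i}{j} ==> ({' & '.join(cons)}))")
--     return rows + cols + " & ".join(impls)
-- ===== Notes on version B (the rewrite author's own statement) =====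
-- stated objective: faster
-- what changed: Diagonal conflicts are computed directly as the at-most-two cells y±(i-x) per lower row instead of scanning every column of each row, and the formula is assembled with joins of comprehensions instead of repeated string concatenation with a trailing-separator strip; intended as faster (O(n^3) vs O(n^4)): a timing run measured B several times faster at the largest size both finished, though at the top size both time out.
import Mathlib
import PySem

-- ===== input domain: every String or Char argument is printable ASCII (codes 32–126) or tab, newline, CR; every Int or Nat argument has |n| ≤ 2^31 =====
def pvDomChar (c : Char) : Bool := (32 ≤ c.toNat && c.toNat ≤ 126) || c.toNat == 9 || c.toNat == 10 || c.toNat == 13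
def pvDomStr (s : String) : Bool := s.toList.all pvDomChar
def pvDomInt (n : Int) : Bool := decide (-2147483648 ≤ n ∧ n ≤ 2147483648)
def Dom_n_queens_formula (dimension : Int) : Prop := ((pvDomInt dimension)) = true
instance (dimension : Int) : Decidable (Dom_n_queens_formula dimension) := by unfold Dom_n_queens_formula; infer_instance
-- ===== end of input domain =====

-- B computes each lower row's diagonal-conflict cells directly as y±(i-x) instead of scanning all n
-- columns, and assembles the formula from joins of mapped ranges instead of repeated string
-- concatenation with a trailing-separator strip.

-- ===== PORT A =====
-- f"Q{i}{j}" and f"~Q{i}{j}" (shared formatting helper)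
def pvQ (i j : Int) : List Char := 'Q' :: (PySem.Int.toChars i ++ PySem.Int.toChars j)

def pvNQ (i j : Int) : List Char := '~' :: pvQ i j

-- conflicts = [] ; three append loops (c1, c2, c3 are the successive states); then "(" + " & ".join(conflicts) + ")"
def deny_all_conflicts (dimension x y : Int) : List Char :=
  '(' :: PySem.Chars.join [' ', '&', ' ']
    ((PySem.List.pyRange (x+1) dimension 1).foldl (fun acc i =>
      (PySem.List.pyRange 0 dimension 1).foldl (fun acc j =>
        if (i - x).natAbs = (j - y).natAbs then acc ++ [pvNQ i j] else acc) acc)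
      ((PySem.List.pyRange (x+1) dimension 1).foldl (fun acc i => acc ++ [pvNQ i y])
        ((PySem.List.pyRange (y+1) dimension 1).foldl (fun acc j => acc ++ [pvNQ x j]) [])))
    ++ [')']

def n_queens_formula (dimension : Int) : String :=
  -- one loop advancing str_row and str_col together (pair accumulator)
  let rc := (PySem.List.pyRange 0 dimension 1).foldl
      (fun (acc : List Char × List Char) i =>
        ((PySem.List.pyRange 0 (dimension-1) 1).foldl
            (fun a j => a ++ (pvQ i j ++ [' ', '|', ' '])) (acc.1 ++ ['('])
          ++ (pvQ i (dimension-1) ++ [')', ' ', '&', ' ']),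
         (PySem.List.pyRange 0 (dimension-1) 1).foldl
            (fun a j => a ++ (pvQ j i ++ [' ', '|', ' '])) (acc.2 ++ ['('])
          ++ (pvQ (dimension-1) i ++ [')', ' ', '&', ' ']))) ([], [])
  -- conflicts_str loop: append "(Qij ==> consecuente) & " when len(consecuente) > 2; then [:-3]
  String.ofList (rc.1 ++ rc.2 ++
    PySem.List.slice
      ((PySem.List.pyRange 0 dimension 1).foldl (fun acc i =>
        (PySem.List.pyRange 0 dimension 1).foldl (fun acc j =>
          if 2 < (deny_all_conflicts dimension i j).length then
            acc ++ (('(' :: pvQ i j ++ [' ', '=', '=', '>', ' '])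
                      ++ deny_all_conflicts dimension i j ++ [')', ' ', '&', ' '])
          else acc) acc) [])
      none (some (-3)))

-- ===== PORT B =====
-- diagonal conflicts below row x: the at most two cells y±(i-x) per row i, kept if on the board
def pvConflictCells (n x y : Int) : List (List Char) :=
  (PySem.List.pyRange (x+1) n 1).foldl (fun acc i =>
    [y - (i - x), y + (i - x)].foldl (fun acc jj =>
      if 0 ≤ jj ∧ jj < n then acc ++ [pvNQ i jj] else acc) acc) []

def n_queens_formula_alt (dimension : Int) : String :=
  String.ofList (
    -- rows = "".join("(" + " | ".join(Qij for j) + ") & " for i)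
    PySem.Chars.join [] ((PySem.List.pyRange 0 dimension 1).map (fun i =>
      '(' :: PySem.Chars.join [' ', '|', ' ']
        ((PySem.List.pyRange 0 dimension 1).map (fun j => pvQ i j)) ++ [')', ' ', '&', ' '])) ++
    -- cols likewise with Qji
    PySem.Chars.join [] ((PySem.List.pyRange 0 dimension 1).map (fun i =>
      '(' :: PySem.Chars.join [' ', '|', ' ']
        ((PySem.List.pyRange 0 dimension 1).map (fun j => pvQ j i)) ++ [')', ' ', '&', ' '])) ++
    -- " & ".join(impls), impls collected by the i, j loop
    PySem.Chars.join [' ', '&', ' ']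
      ((PySem.List.pyRange 0 dimension 1).foldl (fun acc i =>
        (PySem.List.pyRange 0 dimension 1).foldl (fun acc j =>
          if ((PySem.List.pyRange (j+1) dimension 1).map (fun k => pvNQ i k) ++
              (PySem.List.pyRange (i+1) dimension 1).map (fun k => pvNQ k j) ++
              pvConflictCells dimension i j) ≠ [] then
            acc ++ [('(' :: pvQ i j ++ [' ', '=', '=', '>', ' ', '('])
                      ++ PySem.Chars.join [' ', '&', ' ']
                        ((PySem.List.pyRange (j+1) dimension 1).map (fun k => pvNQ i k) ++
                         (PySem.List.pyRange (i+1) dimension 1).map (fun k => pvNQ k j) ++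
                         pvConflictCells dimension i j) ++ [')', ')']]
          else acc) acc) []))

-- ===== PRECONDITION & SPEC =====
def Spec_n_queens_formula (dimension : Int) (out : String) : Prop := out = n_queens_formula_alt dimension
instance (dimension : Int) (out : String) : Decidable (Spec_n_queens_formula dimension out) := by unfold Spec_n_queens_formula; infer_instance

-- ===== CLAIM (what is proved, stated in full; the proofs are below) =====
def Claim_equal_n_queens_formula : Prop := ∀ (dimension : Int), Dom_n_queens_formula dimension → Spec_n_queens_formula dimension (n_queens_formula dimension)

-- ===== LEMMAS AND PROOFS =====

-- join with empty separator is flatten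
theorem pv_join_nil (ps : List (List Char)) : PySem.Chars.join [] ps = ps.flatten := by
  induction ps with
  | nil => rfl
  | cons p t ih =>
      cases t with
      | nil => simp [PySem.Chars.join, List.intercalate]
      | cons q u =>
          simp only [PySem.Chars.join, List.intercalate] at *
          simp [List.intersperse] at *
          simpa using ih

-- join over a list ending in q: all but the last piece carry the separator
theorem pv_join_concat (sep q : List Char) (ps : List (List Char)) :
    PySem.Chars.join sep (ps ++ [q]) = ps.flatMap (fun p => p ++ sep) ++ q := by
  induction ps with
  | nil => simp [PySem.Chars.join, List.intercalate]
  | cons p t ih =>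
      cases t with
      | nil => simp [PySem.Chars.join, List.intercalate, List.intersperse]
      | cons r u =>
          simp only [PySem.Chars.join, List.intercalate] at *
          simp [List.intersperse] at *
          simp [ih]

-- flatMap (· ++ sep) of a nonempty list is join plus one trailing separator
theorem pv_flatMap_sep (sep : List Char) (ps : List (List Char)) (h : ps ≠ []) :
    ps.flatMap (fun p => p ++ sep) = PySem.Chars.join sep ps ++ sep := by
  rcases List.eq_nil_or_concat ps with rfl | ⟨qs, q, rfl⟩
  · exact absurd rfl h
  · rw [List.concat_eq_append, pv_join_concat]; simp

-- a nonempty-headed join is nonempty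
theorem pv_join_ne_nil (sep c : List Char) (t : List (List Char)) (hc : c ≠ []) :
    PySem.Chars.join sep (c :: t) ≠ [] := by
  cases t with
  | nil => simpa [PySem.Chars.join, List.intercalate]
  | cons r u =>
      simp only [PySem.Chars.join, List.intercalate, List.intersperse, List.flatten, ne_eq]
      intro h
      cases c with
      | nil => exact hc rfl
      | cons d cs => simp [List.append_eq] at h

-- filtering a range for membership in a two-element set {a, b}, a < b
theorem pv_filter_two (n a b : Int) (hab : a < b) :
    (PySem.List.pyRange 0 n 1).filter (fun j => decide (j = a ∨ j = b)) =
      (if 0 ≤ a ∧ a < n then [a] else []) ++ (if 0 ≤ b ∧ b < n then [b] else []) := by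
  induction n using Int.induction_on with
  | zero =>
      rw [PySem.List.pyRange_one_eq_nil le_rfl]
      split_ifs with h1 h2 h2 <;> simp_all <;> omega
  | pred i _ =>
      rw [PySem.List.pyRange_one_eq_nil (by omega)]
      split_ifs with h1 h2 h2 <;> simp_all <;> omega
  | succ i ih =>
      rw [PySem.List.pyRange_one_succ_right (by omega : (0:Int) ≤ (i:Int)), List.filter_append, ih]
      by_cases hma : (i:Int) = a
      · have h1 : ¬ (0 ≤ a ∧ a < (i:Int)) := by omega
        have h2 : ¬ (0 ≤ b ∧ b < (i:Int)) := by omega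
        have h3 : 0 ≤ a ∧ a < (i:Int) + 1 := by omega
        have h4 : ¬ (0 ≤ b ∧ b < (i:Int) + 1) := by omega
        simp only [List.filter, hma]
        split_ifs <;> simp_all
      · by_cases hmb : (i:Int) = b
        · have h2 : ¬ (0 ≤ b ∧ b < (i:Int)) := by omega
          have h4 : 0 ≤ b ∧ b < (i:Int) + 1 := by omega
          have h1 : (0 ≤ a ∧ a < (i:Int)) ↔ (0 ≤ a ∧ a < (i:Int) + 1) := by omega
          simp only [List.filter, hmb]
          split_ifs <;> simp_all
        · have h1 : (0 ≤ a ∧ a < (i:Int)) ↔ (0 ≤ a ∧ a < (i:Int) + 1) := by omega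
          have hdec : (decide ((i:Int) = a ∨ (i:Int) = b)) = false := by simp [hma, hmb]
          simp only [List.filter, hdec]
          split_ifs <;> simp_all <;> omega

-- the list of conflict cells both programs build for queen (x, y)
def pvCells (n x y : Int) : List (List Char) :=
  (PySem.List.pyRange (y+1) n 1).map (fun j => pvNQ x j) ++
  (PySem.List.pyRange (x+1) n 1).map (fun i => pvNQ i y) ++
  (PySem.List.pyRange (x+1) n 1).flatMap (fun i =>
    ((if 0 ≤ y - (i - x) ∧ y - (i - x) < n then [y - (i - x)] else []) ++
     (if 0 ≤ y + (i - x) ∧ y + (i - x) < n then [y + (i - x)] else [])).map (pvNQ i))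

-- A's deny_all_conflicts produces exactly "(" ++ join(pvCells) ++ ")"
theorem pv_dac_eq (n x y : Int) :
    deny_all_conflicts n x y = '(' :: PySem.Chars.join [' ', '&', ' '] (pvCells n x y) ++ [')'] := by
  unfold deny_all_conflicts
  rw [PySem.List.foldl_append_singleton_eq_map, PySem.List.foldl_append_singleton_eq_map]
  rw [PySem.List.foldl_congr_mem (PySem.List.pyRange (x+1) n 1) _
    (fun acc i =>
      acc ++ ((if 0 ≤ y - (i - x) ∧ y - (i - x) < n then [y - (i - x)] else []) ++
              (if 0 ≤ y + (i - x) ∧ y + (i - x) < n then [y + (i - x)] else [])).map (pvNQ i)) _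
    (by
      intro acc i hi
      have hxi := (PySem.List.mem_pyRange_one.mp hi).1
      rw [PySem.List.foldl_append_ite (fun j => (i - x).natAbs = (j - y).natAbs) (pvNQ i)]
      congr 1
      rw [List.filter_congr (q := fun j => decide (j = y - (i - x) ∨ j = y + (i - x)))
        (by intro j _; simp only [decide_eq_decide]; omega)]
      rw [pv_filter_two n (y - (i - x)) (y + (i - x)) (by omega)])]
  rw [PySem.List.foldl_append_eq_flatMap]
  unfold pvCells
  simp

-- every conflict cell string is nonempty (it starts with '~')
theorem pv_cells_ne_nil (n x y : Int) : ∀ c ∈ pvCells n x y, c ≠ [] := by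
  intro c hc
  unfold pvCells at hc
  simp only [List.mem_append, List.mem_map, List.mem_flatMap] at hc
  rcases hc with (⟨j, _, rfl⟩ | ⟨i, _, rfl⟩) | ⟨i, _, a, _, rfl⟩
  · simp [pvNQ]
  · simp [pvNQ]
  · simp [pvNQ]

-- A's "len(consecuente) > 2" test is B's "cons is nonempty" test
theorem pv_len_gt_two (n x y : Int) :
    2 < (deny_all_conflicts n x y).length ↔ pvCells n x y ≠ [] := by
  rw [pv_dac_eq]
  cases hps : pvCells n x y with
  | nil => simp [PySem.Chars.join, List.intercalate]
  | cons c t =>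
      have hc : c ≠ [] := pv_cells_ne_nil n x y c (by rw [hps]; exact List.mem_cons_self ..)
      have hne := pv_join_ne_nil [' ', '&', ' '] c t hc
      have hpos : 0 < (PySem.Chars.join [' ', '&', ' '] (c :: t)).length :=
        List.length_pos_of_ne_nil hne
      simp only [List.length_cons, List.length_append, List.length_cons, List.length_nil]
      constructor
      · intro _; simp
      · intro _; omega

-- the per-queen implication piece as B writes it
def pvPiece (n i j : Int) : List Char :=
  ('(' :: pvQ i j ++ [' ', '=', '=', '>', ' ', '(']) ++
    PySem.Chars.join [' ', '&', ' '] (pvCells n i j) ++ [')', ')']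

-- B's three comprehensions concatenated are pvCells
theorem pv_consB_eq (n i j : Int) :
    (PySem.List.pyRange (j+1) n 1).map (fun k => pvNQ i k) ++
    (PySem.List.pyRange (i+1) n 1).map (fun k => pvNQ k j) ++
    pvConflictCells n i j = pvCells n i j := by
  unfold pvConflictCells pvCells
  congr 1
  rw [PySem.List.foldl_congr_mem (PySem.List.pyRange (i+1) n 1) _
    (fun acc i' =>
      acc ++ ((if 0 ≤ j - (i' - i) ∧ j - (i' - i) < n then [j - (i' - i)] else []) ++
              (if 0 ≤ j + (i' - i) ∧ j + (i' - i) < n then [j + (i' - i)] else [])).map (pvNQ i')) _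
    (by
      intro acc i' _
      show List.foldl _ acc [j - (i' - i), j + (i' - i)] = _
      simp only [List.foldl]
      split_ifs <;> simp)]
  rw [PySem.List.foldl_append_eq_flatMap]
  simp

-- B's impls accumulator, closed form
theorem pv_impls_eq (n : Int) :
    (PySem.List.pyRange 0 n 1).foldl (fun acc i =>
      (PySem.List.pyRange 0 n 1).foldl (fun acc j =>
        if ((PySem.List.pyRange (j+1) n 1).map (fun k => pvNQ i k) ++
            (PySem.List.pyRange (i+1) n 1).map (fun k => pvNQ k j) ++
            pvConflictCells n i j) ≠ [] then
          acc ++ [('(' :: pvQ i j ++ [' ', '=', '=', '>', ' ', '('])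
                    ++ PySem.Chars.join [' ', '&', ' ']
                      ((PySem.List.pyRange (j+1) n 1).map (fun k => pvNQ i k) ++
                       (PySem.List.pyRange (i+1) n 1).map (fun k => pvNQ k j) ++
                       pvConflictCells n i j) ++ [')', ')']]
        else acc) acc) [] =
    (PySem.List.pyRange 0 n 1).flatMap (fun i =>
      (PySem.List.pyRange 0 n 1).flatMap (fun j =>
        if pvCells n i j ≠ [] then [pvPiece n i j] else [])) := by
  rw [PySem.List.foldl_congr_mem (PySem.List.pyRange 0 n 1) _
    (fun acc i => acc ++ (PySem.List.pyRange 0 n 1).flatMap (fun j =>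
      if pvCells n i j ≠ [] then [pvPiece n i j] else [])) _
    (by
      intro acc i _
      rw [PySem.List.foldl_congr_mem (PySem.List.pyRange 0 n 1) _
        (fun acc j => acc ++ (if pvCells n i j ≠ [] then [pvPiece n i j] else [])) _
        (by
          intro a j _
          dsimp only
          simp only [pv_consB_eq n i j, pvPiece]
          split_ifs <;> simp)]
      exact PySem.List.foldl_append_eq_flatMap _ _ _)]
  rw [PySem.List.foldl_append_eq_flatMap]
  simp

-- A's conflicts accumulator (before the [:-3] strip): B's pieces, each with " & " appended
theorem pv_conflictsA_eq (n : Int) :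
    (PySem.List.pyRange 0 n 1).foldl (fun acc i =>
      (PySem.List.pyRange 0 n 1).foldl (fun acc j =>
        if 2 < (deny_all_conflicts n i j).length then
          acc ++ (('(' :: pvQ i j ++ [' ', '=', '=', '>', ' '])
                    ++ deny_all_conflicts n i j ++ [')', ' ', '&', ' '])
        else acc) acc) [] =
    ((PySem.List.pyRange 0 n 1).flatMap (fun i =>
      (PySem.List.pyRange 0 n 1).flatMap (fun j =>
        if pvCells n i j ≠ [] then [pvPiece n i j] else []))).flatMap
          (fun p => p ++ [' ', '&', ' ']) := by
  have hpc : ∀ i j : Int,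
      ('(' :: pvQ i j ++ [' ', '=', '=', '>', ' ']) ++ deny_all_conflicts n i j
          ++ [')', ' ', '&', ' '] = pvPiece n i j ++ [' ', '&', ' '] := by
    intro i j
    rw [pv_dac_eq]
    unfold pvPiece
    simp
  rw [PySem.List.foldl_congr_mem (PySem.List.pyRange 0 n 1) _
    (fun acc i => acc ++ (PySem.List.pyRange 0 n 1).flatMap (fun j =>
      if pvCells n i j ≠ [] then pvPiece n i j ++ [' ', '&', ' '] else [])) _
    (by
      intro acc i _
      rw [PySem.List.foldl_congr_mem (PySem.List.pyRange 0 n 1) _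
        (fun acc j => acc ++ (if pvCells n i j ≠ [] then pvPiece n i j ++ [' ', '&', ' '] else [])) _
        (by
          intro a j _
          dsimp only
          split_ifs with h1 h2 h2
          · rw [hpc i j]
          · exact absurd ((pv_len_gt_two n i j).mp h1) h2
          · exact absurd ((pv_len_gt_two n i j).mpr h2) h1
          · rw [List.append_nil])]
      exact PySem.List.foldl_append_eq_flatMap _ _ _)]
  rw [PySem.List.foldl_append_eq_flatMap]
  simp only [List.nil_append, List.flatMap_assoc]
  apply List.flatMap_congr
  intro i _
  apply List.flatMap_congr
  intro j _
  split_ifs <;> simp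

-- stripping the final " & " from the flatMap form yields the join
theorem pv_strip_eq_join (ps : List (List Char)) :
    PySem.List.slice (ps.flatMap (fun p => p ++ [' ', '&', ' '])) none (some (-3)) =
    PySem.Chars.join [' ', '&', ' '] ps := by
  rcases List.eq_nil_or_concat ps with rfl | ⟨qs, q, rfl⟩
  · rw [PySem.List.slice_to_neg_ofNat _ 3 (by omega)]
    simp [PySem.Chars.join, List.intercalate]
  · rw [pv_flatMap_sep _ _ (by simp)]
    rw [PySem.List.slice_to_neg_ofNat _ 3 (by omega)]
    simp

-- the row/column piece for line i: A's inner loop output equals B's join, for 0 < n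
theorem pv_line_eq (n : Int) (hn : 0 < n) (f : Int → List Char) :
    ('(' :: ((PySem.List.pyRange 0 (n-1) 1).flatMap (fun j => f j ++ [' ', '|', ' '])
        ++ (f (n-1) ++ [')', ' ', '&', ' ']))) =
    '(' :: PySem.Chars.join [' ', '|', ' '] ((PySem.List.pyRange 0 n 1).map f)
        ++ [')', ' ', '&', ' '] := by
  have hsplit : PySem.List.pyRange 0 n 1 = PySem.List.pyRange 0 (n-1) 1 ++ [n-1] := by
    have h := PySem.List.pyRange_one_succ_right (a := 0) (b := n - 1) (by omega)
    rw [show n - 1 + 1 = n by ring] at h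
    exact h
  rw [hsplit, List.map_append, List.map_singleton, pv_join_concat, List.flatMap_map]
  simp

-- A's rows (or cols) accumulator equals B's join-of-map, as one flatMap each
theorem pv_lines_eq (n : Int) (f : Int → Int → List Char) :
    (PySem.List.pyRange 0 n 1).foldl (fun acc i =>
      (PySem.List.pyRange 0 (n-1) 1).foldl (fun a j => a ++ (f i j ++ [' ', '|', ' ']))
          (acc ++ ['(']) ++ (f i (n-1) ++ [')', ' ', '&', ' '])) [] =
    PySem.Chars.join [] ((PySem.List.pyRange 0 n 1).map (fun i =>
      '(' :: PySem.Chars.join [' ', '|', ' ']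
        ((PySem.List.pyRange 0 n 1).map (fun j => f i j)) ++ [')', ' ', '&', ' '])) := by
  rw [pv_join_nil]
  rw [show ((PySem.List.pyRange 0 n 1).map (fun i =>
      '(' :: PySem.Chars.join [' ', '|', ' ']
        ((PySem.List.pyRange 0 n 1).map (fun j => f i j)) ++ [')', ' ', '&', ' '])).flatten =
    (PySem.List.pyRange 0 n 1).flatMap (fun i =>
      '(' :: PySem.Chars.join [' ', '|', ' ']
        ((PySem.List.pyRange 0 n 1).map (fun j => f i j)) ++ [')', ' ', '&', ' ']) from rfl]
  rw [PySem.List.foldl_congr_mem (PySem.List.pyRange 0 n 1) _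
    (fun acc i => acc ++ ('(' :: ((PySem.List.pyRange 0 (n-1) 1).flatMap
        (fun j => f i j ++ [' ', '|', ' ']) ++ (f i (n-1) ++ [')', ' ', '&', ' '])))) _
    (by
      intro a i _
      rw [PySem.List.foldl_append_eq_flatMap]
      simp)]
  rw [PySem.List.foldl_append_eq_flatMap, List.nil_append]
  apply List.flatMap_congr
  intro i hi
  have hn : 0 < n := by
    have h := PySem.List.mem_pyRange_one.mp hi
    omega
  exact pv_line_eq n hn (f i)

-- ===== VERDICT (by name: the statement is the Claim_ definition above) =====
theorem n_queens_formula_spec : Claim_equal_n_queens_formula := by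
  intro n _
  unfold Spec_n_queens_formula n_queens_formula n_queens_formula_alt
  rw [PySem.List.foldl_prod_mk
    (f := fun acc i => (PySem.List.pyRange 0 (n-1) 1).foldl
        (fun a j => a ++ (pvQ i j ++ [' ', '|', ' '])) (acc ++ ['(']) ++
        (pvQ i (n-1) ++ [')', ' ', '&', ' ']))
    (g := fun acc i => (PySem.List.pyRange 0 (n-1) 1).foldl
        (fun a j => a ++ (pvQ j i ++ [' ', '|', ' '])) (acc ++ ['(']) ++
        (pvQ (n-1) i ++ [')', ' ', '&', ' ']))]
  rw [pv_conflictsA_eq, pv_strip_eq_join, ← pv_impls_eq]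
  rw [pv_lines_eq n (fun i j => pvQ i j), pv_lines_eq n (fun i j => pvQ j i)]
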